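-- pv_equiv track=rewrite | github.com/SatishoBananamoto/svx | src/svx/parser.py | _uses_append_redirect
-- ===== SOURCE A (Python) =====
-- def _uses_append_redirect(tokens: list[str]) -> bool:
--     if ">>" in tokens:
--         return True
--     for segment in _pipe_segments(tokens):
--         if segment and segment[0] == "tee" and any(
--             token in ("-a", "--append") for token in segment[1:]
--         ):
--             return True
--     return False
--
-- def _pipe_segments(tokens: list[str]) -> list[list[str]]:
--     segments = []
--     current = []
--     for token in tokens:
--         if token == "|":
--             if current:
--                 segments.append(current)
--             current = []
--         else:
--             current.append(token)
--     if current: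
--         segments.append(current)
--     return segments
-- ===== SOURCE B (Python) =====
-- def _uses_append_redirect(tokens: list[str]) -> bool:
--     at_start = True
--     in_tee = False
--     for tok in tokens:
--         if tok == ">>":
--             return True
--         if tok == "|":
--             at_start = True
--             in_tee = False
--         elif at_start:
--             in_tee = tok == "tee"
--             at_start = False
--         elif in_tee and tok in ("-a", "--append"):
--             return True
--     return False
-- ===== Notes on version B (the rewrite author's own statement) =====
-- stated objective: simpler
-- what changed: Single pass with two booleans of per-segment state (segment-start flag, current-segment-starts-with-tee) replacing the global '>>' membership scan plus materializing all pipe segments and scanning each; returns as soon as '>>' or a tee-segment append flag is seen.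
import Mathlib
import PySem

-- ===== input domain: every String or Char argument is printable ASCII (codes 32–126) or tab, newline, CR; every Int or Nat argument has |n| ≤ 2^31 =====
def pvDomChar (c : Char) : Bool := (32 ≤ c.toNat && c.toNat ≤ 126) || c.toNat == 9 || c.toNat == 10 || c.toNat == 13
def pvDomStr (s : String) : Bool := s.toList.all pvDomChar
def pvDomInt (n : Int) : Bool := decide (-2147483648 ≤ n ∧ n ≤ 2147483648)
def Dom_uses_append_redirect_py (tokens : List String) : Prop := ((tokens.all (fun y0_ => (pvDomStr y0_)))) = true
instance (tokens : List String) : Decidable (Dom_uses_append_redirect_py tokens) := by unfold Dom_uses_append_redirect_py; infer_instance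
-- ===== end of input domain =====

-- B replaces A's global '>>' membership scan plus segment-list construction by one pass with
-- two booleans of per-segment state; same return value, simpler and allocation-free.

-- ===== PORT A =====
-- the for-loop of _pipe_segments, state (segments, current)
def pipeSegmentsGo (segments : List (List String)) (current : List String) :
    List String → List (List String) × List String
  | [] => (segments, current)
  | token :: rest =>
    if token == "|" then
      pipeSegmentsGo (if current.isEmpty then segments else segments ++ [current]) [] rest
    else
      pipeSegmentsGo segments (current ++ [token]) rest

def pipeSegments (tokens : List String) : List (List String) :=
  let p := pipeSegmentsGo [] [] tokens
  if p.2.isEmpty then p.1 else p.1 ++ [p.2]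

-- 'segment and segment[0] == "tee" and any(token in ("-a","--append") for token in segment[1:])'
def segMatch (seg : List String) : Bool :=
  match seg with
  | [] => false
  | h :: t => h == "tee" && t.any (fun tk => tk == "-a" || tk == "--append")

def uses_append_redirect_py (tokens : List String) : Bool :=
  if tokens.contains ">>" then true
  else (pipeSegments tokens).any segMatch

-- ===== PORT B =====
def altLoop (atStart inTee : Bool) : List String → Bool
  | [] => false
  | tok :: rest =>
    if tok == ">>" then true
    else if tok == "|" then altLoop true false rest
    else if atStart then altLoop false (tok == "tee") rest
    else if inTee && (tok == "-a" || tok == "--append") then true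
    else altLoop atStart inTee rest

def uses_append_redirect_py_alt (tokens : List String) : Bool :=
  altLoop true false tokens

-- ===== PRECONDITION & SPEC =====
def Spec_uses_append_redirect_py (tokens : List String) (out : Bool) : Prop := out = uses_append_redirect_py_alt tokens
instance (tokens : List String) (out : Bool) : Decidable (Spec_uses_append_redirect_py tokens out) := by unfold Spec_uses_append_redirect_py; infer_instance

-- ===== CLAIM (what is proved, stated in full; the proofs are below) =====
def Claim_equal_uses_append_redirect_py : Prop := ∀ (tokens : List String), Dom_uses_append_redirect_py tokens → Spec_uses_append_redirect_py tokens (uses_append_redirect_py tokens)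

-- ===== LEMMAS AND PROOFS =====

-- B's loop with the '>>' early return removed
def loop2 (atStart inTee : Bool) : List String → Bool
  | [] => false
  | tok :: rest =>
    if tok == "|" then loop2 true false rest
    else if atStart then loop2 false (tok == "tee") rest
    else if inTee && (tok == "-a" || tok == "--append") then true
    else loop2 atStart inTee rest

theorem altLoop_eq_contains_or_loop2 :
    ∀ (toks : List String) (a i : Bool),
      altLoop a i toks = (toks.contains ">>" || loop2 a i toks) := by
  intro toks
  induction toks with
  | nil => intro a i; rfl
  | cons tok rest ih =>
    intro a i
    simp only [altLoop, loop2, List.contains_cons, ih]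
    by_cases h1 : tok = ">>"
    · subst h1; simp
    · have h1' : (">>" == tok) = false := by
        simpa using fun hb => h1 hb.symm
      simp only [beq_iff_eq, if_neg h1, h1', Bool.false_or]
      by_cases h2 : tok = "|"
      · subst h2; simp
      · simp only [if_neg h2]
        by_cases h3 : a = true
        · simp [h3]
        · simp only [if_neg h3]
          cases hb : (i && (tok == "-a" || tok == "--append")) with
          | true => simp [hb]
          | false => simp [hb]

def teeHead (cur : List String) : Bool := cur.headD "" == "tee"

theorem go_finish_any :
    ∀ (toks : List String) (segs : List (List String)) (cur : List String),
      (let p := pipeSegmentsGo segs cur toks;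
       if p.2.isEmpty then p.1 else p.1 ++ [p.2]).any segMatch
      = (segs.any segMatch || segMatch cur || loop2 cur.isEmpty (teeHead cur) toks) := by
  intro toks
  induction toks with
  | nil =>
    intro segs cur
    cases cur with
    | nil => simp [pipeSegmentsGo, loop2, segMatch]
    | cons h t => simp [pipeSegmentsGo, loop2, List.any_append]
  | cons tok rest ih =>
    intro segs cur
    simp only [pipeSegmentsGo]
    cases h2 : (tok == "|") with
    | true =>
      have hl : loop2 cur.isEmpty (teeHead cur) (tok :: rest) = loop2 true false rest := by
        simp [loop2, h2]
      rw [hl]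
      simp only [h2, if_true]
      rw [ih]
      cases cur <;> simp [segMatch, teeHead, List.any_append, Bool.or_assoc]
    | false =>
      simp only [h2, Bool.false_eq_true, if_false]
      rw [ih]
      cases cur with
      | nil => simp [segMatch, teeHead, loop2, h2]
      | cons h t =>
        have hl : loop2 (h :: t).isEmpty (teeHead (h :: t)) (tok :: rest)
            = (if (h == "tee") && (tok == "-a" || tok == "--append") then true
               else loop2 false (h == "tee") rest) := by
          simp [loop2, h2, teeHead]
        rw [hl]
        have hseg : segMatch (h :: (t ++ [tok]))
            = (segMatch (h :: t) || ((h == "tee") && (tok == "-a" || tok == "--append"))) := by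
          simp [segMatch, List.any_append, Bool.and_or_distrib_left]
        simp only [List.cons_append, hseg]
        cases hc : ((h == "tee") && (tok == "-a" || tok == "--append")) with
        | true => simp [hc, teeHead]
        | false => simp [hc, teeHead, Bool.or_assoc]

-- ===== VERDICT (by name: the statement is the Claim_ definition above) =====
theorem uses_append_redirect_py_spec : Claim_equal_uses_append_redirect_py := by
  intro tokens _
  unfold Spec_uses_append_redirect_py uses_append_redirect_py uses_append_redirect_py_alt
  rw [altLoop_eq_contains_or_loop2]
  unfold pipeSegments
  cases hc : tokens.contains ">>" with
  | true => simp [hc]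
  | false =>
    have h := go_finish_any tokens [] []
    have he : (("" : String) == "tee") = false := by decide
    simp only [List.any_nil, segMatch, Bool.false_or, List.isEmpty_nil, teeHead,
      List.headD_nil, he] at h
    simp only [hc, Bool.false_or, Bool.false_eq_true, if_false]
    exact h
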